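-- pv_equiv track=rewrite | github.com/dongdok/HAOS_PF | scripts/rebuild_tuya_local_10_devices.py | choose_type
-- ===== SOURCE A (Python) =====
-- from typing import Any, Dict, List, Tuple
--
-- def choose_type(options: List[str], keywords: List[str]) -> str:
--     lowered = [(o, o.lower()) for o in options]
--     for kw in keywords:
--         k = kw.lower()
--         for raw, low in lowered:
--             if k in low:
--                 return raw
--     return options[0]
-- ===== SOURCE B (Python) =====
-- from typing import List
--
--
-- def choose_type(options: List[str], keywords: List[str]) -> str:
--     # Score each option by the index of the earliest keyword it contains
--     # (case-insensitive substring test); options matching no keyword get the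
--     # sentinel len(keywords).  Pick the option with the smallest
--     # (score, position) pair.
--     lows = [kw.lower() for kw in keywords]
--     n = len(lows)
--
--     def score(opt: str) -> int:
--         low = opt.lower()
--         return next((j for j, k in enumerate(lows) if k in low), n)
--
--     best = min(range(len(options)), key=lambda i: (score(options[i]), i))
--     return options[best]
-- ===== Notes on version B (the rewrite author's own statement) =====
-- stated objective: alternative
-- what changed: Replaced A's keyword-first nested scan with early return by per-option priority scoring (index of earliest matching keyword, sentinel len(keywords)) followed by an argmin over (score, position).
import Mathlib
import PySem

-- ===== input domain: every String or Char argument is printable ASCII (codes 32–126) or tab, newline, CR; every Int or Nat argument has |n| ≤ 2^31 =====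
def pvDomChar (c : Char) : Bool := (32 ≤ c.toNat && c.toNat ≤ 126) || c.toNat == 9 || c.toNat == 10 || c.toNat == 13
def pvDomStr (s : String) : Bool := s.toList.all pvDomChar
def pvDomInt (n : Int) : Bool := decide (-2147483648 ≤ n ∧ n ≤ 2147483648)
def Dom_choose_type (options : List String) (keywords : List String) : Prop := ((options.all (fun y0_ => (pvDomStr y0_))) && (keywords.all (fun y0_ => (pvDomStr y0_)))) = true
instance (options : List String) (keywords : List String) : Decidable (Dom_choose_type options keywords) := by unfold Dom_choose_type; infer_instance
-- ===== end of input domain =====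

-- B replaces A's keyword-first nested scan (early return) by per-option priority scoring
-- plus an argmin over (score, position); alternative decomposition, same cost.

-- ===== PORT A =====
def choose_type (options : List String) (keywords : List String) : String :=
  let lowered := options.map (fun o => (o, PySem.Str.lower o))
  match keywords.findSome? (fun kw =>
      let k := PySem.Str.lower kw
      (lowered.find? (fun rl => PySem.Str.isIn k rl.2)).map (fun rl => rl.1)) with
  | some raw => raw
  | none => (PySem.List.pyGet? options 0).getD ""   -- options[0]; none (IndexError) excluded by Pre_

-- ===== PORT B =====
-- score(opt) from Source B: index of first keyword (lowercased) contained in opt.lower(), else n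
def scoreB (lows : List String) (n : Int) (opt : String) : Int :=
  let low := PySem.Str.lower opt
  (((PySem.List.enumerate lows).find? (fun jk => PySem.Str.isIn jk.2 low)).map (fun jk => jk.1)).getD n

def choose_type_alt (options : List String) (keywords : List String) : String :=
  let lows := keywords.map (fun kw => PySem.Str.lower kw)
  let n : Int := lows.length
  match PySem.List.min2? (PySem.List.pyRange 0 options.length)
      (fun i => scoreB lows n (PySem.List.pyGetD options i ""))
      (fun i => i) with
  | some i => PySem.List.pyGetD options i ""
  | none => ""   -- min over empty range (ValueError); excluded by Pre_

-- ===== PRECONDITION & SPEC =====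
-- Pre_ excludes empty `options`, on which A raises IndexError (options[0]) and B raises ValueError (min of an empty range).
def Pre_choose_type (options : List String) (keywords : List String) : Prop := options ≠ []
instance (options : List String) (keywords : List String) : Decidable (Pre_choose_type options keywords) := by unfold Pre_choose_type; infer_instance
def pvWitness_choose_type : List String × List String := (["Switch", "Light"], ["light"])

def Spec_choose_type (options : List String) (keywords : List String) (out : String) : Prop := out = choose_type_alt options keywords
instance (options : List String) (keywords : List String) (out : String) : Decidable (Spec_choose_type options keywords out) := by unfold Spec_choose_type; infer_instance

-- ===== CLAIM (what is proved, stated in full; the proofs are below) =====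
def Claim_equal_choose_type : Prop := ∀ (options : List String) (keywords : List String), Dom_choose_type options keywords → Pre_choose_type options keywords → Spec_choose_type options keywords (choose_type options keywords)

-- ===== LEMMAS AND PROOFS =====

-- the fold step of PySem.List.min2? with second key = identity, specialised to Int elements
def mstep (k1 : Int → Int) (acc : Option Int) (x : Int) : Option Int :=
  match acc with
  | none => some x
  | some m => if (decide (k1 x < k1 m) || (!decide (k1 m < k1 x) && decide (x < m))) then some x else some m

lemma min2?_eq_foldl (xs : List Int) (k1 : Int → Int) :
    PySem.List.min2? xs k1 (fun i => i) = xs.foldl (mstep k1) none := by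
  unfold PySem.List.min2? mstep
  congr 1
  funext acc x
  cases acc <;> rfl

lemma foldl_mstep_none (k1 : Int → Int) (x : Int) (xs : List Int) :
    (x :: xs).foldl (mstep k1) none = xs.foldl (mstep k1) (some x) := rfl

-- the accumulator survives if nothing later beats it
lemma foldl_mstep_stay (k1 : Int → Int) :
    ∀ (l : List Int) (m : Int), (∀ x ∈ l, ¬ k1 x < k1 m ∧ m < x) →
      l.foldl (mstep k1) (some m) = some m := by
  intro l
  induction l with
  | nil => intro m _; rfl
  | cons x t ih =>
    intro m h
    have hx := h x (by simp)
    have : mstep k1 (some m) x = some m := by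
      simp only [mstep]
      rw [if_neg]
      simp only [Bool.or_eq_true, decide_eq_true_eq, Bool.and_eq_true, Bool.not_eq_eq_eq_not,
        Bool.not_true, decide_eq_false_iff_not, not_or, not_and]
      refine ⟨hx.1, fun _ => ?_⟩
      omega
    simp only [List.foldl_cons, this]
    exact ih m (fun y hy => h y (by simp [hy]))

-- the first element achieving the minimum of k1 wins
lemma foldl_mstep_first (k1 : Int → Int) (x0 : Int) (l2 : List Int)
    (h2 : ∀ x ∈ l2, ¬ k1 x < k1 x0 ∧ x0 < x) :
    ∀ (l1 : List Int) (m : Int), (∀ x ∈ m :: l1, k1 x0 < k1 x) →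
      (l1 ++ x0 :: l2).foldl (mstep k1) (some m) = some x0 := by
  intro l1
  induction l1 with
  | nil =>
    intro m h1
    have hm : k1 x0 < k1 m := h1 m (by simp)
    have : mstep k1 (some m) x0 = some x0 := by
      simp only [mstep]
      rw [if_pos]
      simp only [Bool.or_eq_true, decide_eq_true_eq]
      exact Or.inl hm
    simp only [List.nil_append, List.foldl_cons, this]
    exact foldl_mstep_stay k1 l2 x0 h2
  | cons y t ih =>
    intro m h1
    have hy : k1 x0 < k1 y := h1 y (by simp)
    have hm : k1 x0 < k1 m := h1 m (by simp)
    have hstep : mstep k1 (some m) y = some y ∨ mstep k1 (some m) y = some m := by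
      simp only [mstep]; split <;> simp
    simp only [List.cons_append, List.foldl_cons]
    rcases hstep with h | h <;> rw [h]
    · refine ih y ?_
      intro x hx
      rcases List.mem_cons.1 hx with rfl | hx
      · exact hy
      · exact h1 x (by simp [hx])
    · refine ih m ?_
      intro x hx
      rcases List.mem_cons.1 hx with rfl | hx
      · exact hm
      · exact h1 x (by simp [hx])

-- entry lemma: from `none`, with x0 first minimum of the whole list
lemma foldl_mstep_argmin (k1 : Int → Int) (x0 : Int) (l1 l2 : List Int)
    (h1 : ∀ x ∈ l1, k1 x0 < k1 x) (h2 : ∀ x ∈ l2, ¬ k1 x < k1 x0 ∧ x0 < x) :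
    (l1 ++ x0 :: l2).foldl (mstep k1) none = some x0 := by
  cases l1 with
  | nil =>
    simp only [List.nil_append, foldl_mstep_none]
    exact foldl_mstep_stay k1 l2 x0 h2
  | cons y t =>
    simp only [List.cons_append, foldl_mstep_none]
    refine foldl_mstep_first k1 x0 l2 h2 t y ?_
    intro x hx
    rcases List.mem_cons.1 hx with rfl | hx
    · exact h1 x (by simp)
    · exact h1 x (by simp [hx])

-- comparisons-only congruence for the fold
lemma foldl_mstep_congr (k1 k1' : Int → Int) :
    ∀ (l : List Int) (m : Int), (∀ x ∈ m :: l, ∀ y ∈ m :: l, (k1' x < k1' y ↔ k1 x < k1 y)) →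
      l.foldl (mstep k1') (some m) = l.foldl (mstep k1) (some m) := by
  intro l
  induction l with
  | nil => intro m _; rfl
  | cons x t ih =>
    intro m h
    have hxm := h x (by simp) m (by simp)
    have hmx := h m (by simp) x (by simp)
    have hstep : mstep k1' (some m) x = mstep k1 (some m) x := by
      simp only [mstep]
      congr 1
      simp only [hxm, hmx]
    have hmem : ∀ z, z = m ∨ z = x → ∀ a ∈ z :: t, a ∈ m :: x :: t := by
      intro z hz a ha
      rcases List.mem_cons.1 ha with rfl | ha
      · rcases hz with rfl | rfl <;> simp
      · simp [ha]
    have hsub : ∀ z, z = m ∨ z = x →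
        t.foldl (mstep k1') (some z) = t.foldl (mstep k1) (some z) := by
      intro z hz
      refine ih z ?_
      intro a ha b hb
      exact h a (hmem z hz a ha) b (hmem z hz b hb)
    simp only [List.foldl_cons, hstep]
    have : mstep k1 (some m) x = some x ∨ mstep k1 (some m) x = some m := by
      simp only [mstep]; split <;> simp
    rcases this with h' | h' <;> rw [h']
    · exact hsub x (Or.inr rfl)
    · exact hsub m (Or.inl rfl)

-- shift lemma for the enumerate-based score
lemma enum_find_shift (q : String → Bool) :
    ∀ (lows : List String) (s : Int),
      (((PySem.List.enumerate lows s).find? (fun jk => q jk.2)).map (fun jk => jk.1)).getD (s + lows.length)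
        = s + (((PySem.List.enumerate lows 0).find? (fun jk => q jk.2)).map (fun jk => jk.1)).getD ((lows.length : Int)) := by
  intro lows
  induction lows with
  | nil => intro s; simp [PySem.List.enumerate]
  | cons k t ih =>
    intro s
    rw [PySem.List.enumerate_cons, PySem.List.enumerate_cons]
    by_cases hq : q k = true
    · simp [hq]
    · rw [List.find?_cons_of_neg (by simp [hq]), List.find?_cons_of_neg (by simp [hq])]
      have h1 := ih (s + 1)
      have h2 := ih 1
      simp only [List.length_cons]
      push_cast
      rw [show s + (↑t.length + 1) = (s + 1) + ↑t.length by ring, h1,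
          show (↑t.length + 1 : Int) = 1 + ↑t.length by ring, h2]
      ring

lemma scoreB_cons (k : String) (lows : List String) (opt : String) :
    scoreB (k :: lows) (lows.length + 1) opt =
      (if PySem.Str.isIn k (PySem.Str.lower opt) then 0
       else 1 + scoreB lows lows.length opt) := by
  simp only [scoreB, PySem.List.enumerate_cons, List.find?_cons, PySem.Str.isIn_eq,
    PySem.Str.toList_lower]
  by_cases hq : PySem.Chars.isIn k.toList (PySem.Chars.lower opt.toList) = true
  · simp [hq]
  · rw [Bool.not_eq_true] at hq
    simp only [hq, Bool.false_eq_true, if_false]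
    have h := enum_find_shift (fun l => PySem.Str.isIn l (PySem.Str.lower opt)) lows 1
    simp only [PySem.Str.isIn_eq, PySem.Str.toList_lower] at h
    rw [show (0 : Int) + 1 = 1 by ring, show (↑lows.length + 1 : Int) = 1 + ↑lows.length by ring]
    exact h

lemma scoreB_nonneg (lows : List String) (n : Int) (opt : String) (hn : 0 ≤ n) :
    0 ≤ scoreB lows n opt := by
  simp only [scoreB]
  cases hf : (PySem.List.enumerate lows 0).find? (fun jk => PySem.Str.isIn jk.2 (PySem.Str.lower opt)) with
  | none => simpa [hf]
  | some jk =>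
    have hm := List.mem_of_find?_eq_some hf
    rw [PySem.List.mem_enumerate_iff] at hm
    obtain ⟨kk, _, rfl⟩ := hm
    simp

-- the core equivalence, by induction on the (lowercased) keyword list
lemma core (options : List String) (hne : options ≠ []) :
    ∀ (lows : List String),
      (match lows.findSome? (fun k =>
          ((options.map (fun o => (o, PySem.Str.lower o))).find? (fun rl => PySem.Str.isIn k rl.2)).map (fun rl => rl.1)) with
        | some raw => raw
        | none => (PySem.List.pyGet? options 0).getD "") =
      (match PySem.List.min2? (PySem.List.pyRange 0 options.length)
          (fun i => scoreB lows lows.length (PySem.List.pyGetD options i ""))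
          (fun i => i) with
        | some i => PySem.List.pyGetD options i ""
        | none => "") := by
  have hlen : 0 < options.length := List.length_pos_iff.mpr hne
  have hlenZ : (0 : Int) < (options.length : Int) := by exact_mod_cast hlen
  intro lows
  induction lows with
  | nil =>
    simp only [List.findSome?_nil]
    rw [min2?_eq_foldl, PySem.List.pyRange_one_cons hlenZ, show ((0 : Int) + 1) = 1 by ring]
    have h2 : ∀ x ∈ PySem.List.pyRange 1 (options.length : Int),
        ¬ (fun i => scoreB [] ((([] : List String).length : Int)) (PySem.List.pyGetD options i "")) x
            < (fun i => scoreB [] ((([] : List String).length : Int)) (PySem.List.pyGetD options i "")) 0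
          ∧ (0 : Int) < x := by
      intro x hx
      rw [PySem.List.mem_pyRange_one] at hx
      exact ⟨by simp [scoreB, PySem.List.enumerate], by omega⟩
    have harg := foldl_mstep_argmin
      (fun i => scoreB [] ((([] : List String).length : Int)) (PySem.List.pyGetD options i ""))
      0 [] (PySem.List.pyRange 1 (options.length : Int)) (by simp) h2
    rw [List.nil_append] at harg
    rw [harg]
    simp [PySem.List.pyGetD]
  | cons kw t ih =>
    rw [List.findSome?_cons]
    cases hfind : ((options.map (fun o => (o, PySem.Str.lower o))).find? (fun rl => PySem.Str.isIn kw rl.2)) with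
    | some rl =>
      rw [List.find?_eq_some_iff_getElem] at hfind
      obtain ⟨hp, i0, hi0, heq, hprev⟩ := hfind
      rw [List.length_map] at hi0
      have hgetm : ∀ (j : Nat) (hj : j < options.length),
          (options.map (fun o => (o, PySem.Str.lower o)))[j]'(by simpa using hj)
            = (options[j], PySem.Str.lower options[j]) := by
        intro j hj; simp
      have hp' : PySem.Str.isIn kw (PySem.Str.lower options[i0]) = true := by
        rw [hgetm i0 hi0] at heq; rw [← heq] at hp; exact hp
      have hprev' : ∀ (j : Nat) (hj : j < i0), ¬ PySem.Str.isIn kw (PySem.Str.lower (options[j]'(by omega))) = true := by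
        intro j hj
        have := hprev j hj
        rw [hgetm j (by omega)] at this
        simpa using this
      -- the argmin is exactly i0
      have hsplit : PySem.List.pyRange 0 (options.length : Int)
          = PySem.List.pyRange 0 (i0 : Int) ++ (i0 : Int) :: PySem.List.pyRange ((i0 : Int) + 1) (options.length : Int) := by
        have ha := PySem.List.pyRange_one_append 0 (i0 : Int) (options.length : Int) (by omega) (by exact_mod_cast hi0.le)
        have hb : PySem.List.pyRange (i0 : Int) (options.length : Int)
            = (i0 : Int) :: PySem.List.pyRange ((i0 : Int) + 1) (options.length : Int) :=
          PySem.List.pyRange_one_cons (by exact_mod_cast hi0)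
        rw [ha, hb]
      set k1 : Int → Int := fun i => scoreB (kw :: t) ((kw :: t).length : Int) (PySem.List.pyGetD options i "") with hk1
      have hscons : ∀ i : Int, k1 i =
          (if PySem.Str.isIn kw (PySem.Str.lower (PySem.List.pyGetD options i "")) then 0
           else 1 + scoreB t (t.length : Int) (PySem.List.pyGetD options i "")) := by
        intro i
        rw [hk1]
        simp only [List.length_cons]
        rw [show ((t.length + 1 : Nat) : Int) = (t.length : Int) + 1 by push_cast; ring]
        exact scoreB_cons kw t _
      have hget : ∀ (x : Int) (h0 : 0 ≤ x) (h1 : x < (options.length : Int)),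
          PySem.List.pyGetD options x "" = options[x.toNat]'(by omega) := by
        intro x h0 h1
        exact PySem.List.pyGetD_eq_getElem options "" h0 h1
      have hk1i0 : k1 (i0 : Int) = 0 := by
        rw [hscons, hget (i0 : Int) (by omega) (by exact_mod_cast hi0)]
        simp only [Int.toNat_natCast]
        rw [if_pos hp']
      rw [min2?_eq_foldl, hsplit,
          foldl_mstep_argmin k1 (i0 : Int) _ _ ?h1 ?h2]
      case h1 =>
        intro x hx
        rw [PySem.List.mem_pyRange_one] at hx
        rw [hk1i0, hscons, hget x hx.1 (by have := hi0; omega)]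
        rw [if_neg (hprev' x.toNat (by omega))]
        have := scoreB_nonneg t (t.length : Int) (options[x.toNat]'(by have := hi0; omega)) (by positivity)
        omega
      case h2 =>
        intro x hx
        rw [PySem.List.mem_pyRange_one] at hx
        refine ⟨?_, by omega⟩
        rw [hk1i0]
        have : 0 ≤ k1 x := by
          rw [hk1]
          exact scoreB_nonneg _ _ _ (by positivity)
        omega
      · simp only
        rw [hget (i0 : Int) (by omega) (by exact_mod_cast hi0)]
        simp only [Int.toNat_natCast]
        rw [hgetm i0 hi0] at heq
        rw [← heq]
        simp
    | none =>
      have hnone : ∀ (j : Nat) (hj : j < options.length),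
          ¬ PySem.Str.isIn kw (PySem.Str.lower (options[j]'hj)) = true := by
        intro j hj hcon
        have hmem : (options[j]'hj, PySem.Str.lower (options[j]'hj))
            ∈ options.map (fun o => (o, PySem.Str.lower o)) := by
          exact List.mem_map_of_mem (List.getElem_mem hj)
        have := List.find?_eq_none.mp hfind _ hmem
        simp only at this
        exact this hcon
      simp only [Option.map_none]
      rw [min2?_eq_foldl]
      rw [min2?_eq_foldl] at ih
      rw [PySem.List.pyRange_one_cons hlenZ, foldl_mstep_none,
        foldl_mstep_congr (fun i => scoreB t (t.length : Int) (PySem.List.pyGetD options i "")) _ _ _ ?hcmp]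
      case hcmp =>
        intro x hx y hy
        have hxr : 0 ≤ x ∧ x < (options.length : Int) := by
          rcases List.mem_cons.1 hx with rfl | hx
          · omega
          · rw [PySem.List.mem_pyRange_one] at hx; omega
        have hyr : 0 ≤ y ∧ y < (options.length : Int) := by
          rcases List.mem_cons.1 hy with rfl | hy
          · omega
          · rw [PySem.List.mem_pyRange_one] at hy; omega
        have hshift : ∀ z : Int, 0 ≤ z → z < (options.length : Int) →
            scoreB (kw :: t) ((kw :: t).length : Int) (PySem.List.pyGetD options z "")
              = 1 + scoreB t (t.length : Int) (PySem.List.pyGetD options z "") := by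
          intro z h0 h1
          simp only [List.length_cons]
          rw [show ((t.length + 1 : Nat) : Int) = (t.length : Int) + 1 by push_cast; ring,
            scoreB_cons kw t _]
          rw [PySem.List.pyGetD_eq_getElem options "" h0 h1]
          rw [if_neg (hnone z.toNat (by omega))]
        simp only [hshift x hxr.1 hxr.2, hshift y hyr.1 hyr.2]
        omega
      rw [← foldl_mstep_none, ← PySem.List.pyRange_one_cons hlenZ]
      exact ih

-- ===== VERDICT (by name: the statement is the Claim_ definition above) =====
theorem choose_type_spec : Claim_equal_choose_type := by
  intro options keywords _ hpre
  have h := core options hpre (keywords.map (fun kw => PySem.Str.lower kw))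
  rw [List.findSome?_map] at h
  simp only [List.length_map] at h
  unfold Spec_choose_type choose_type choose_type_alt
  simp only [List.length_map]
  exact h
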